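-- pv_equiv track=rewrite | github.com/ecbush/xenoGI | sim/validationSim.py | countSimXgiGenesOverlaps
-- ===== SOURCE A (Python) =====
-- def countSimXgiGenesOverlaps(simSL,xgiSL):
--     '''Given a list of gene sets corresponding to the simulation islands
-- (at a node) and a similar list from xenoGI, count the total number of
-- sim genes, xgi genes, and overlapping genes. Returns total num sim
-- genes, total num xgi genes, total num overlap genes (this allows more
-- than one xgi island to be counted), and the count of sim islands with
-- exactly one xgi island matching.
--
--     '''
--
--
--     # get all genes of each type
--     allSimGenesS=set()
--     for S in simSL:
--         allSimGenesS.update(S)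
--
--     allXgiGenesS=set()
--     for S in xgiSL:
--         allXgiGenesS.update(S)
--
--     matchS = allSimGenesS.intersection(allXgiGenesS)
--
--     # get prop sim islands with exactly 1 overlap among xgi islands
--     exactlyOneOverlapCt = 0
--     for simS in simSL:
--         numOverlap=0
--         for xgiS in xgiSL:
--             if len(simS.intersection(xgiS)) > 0:
--                 numOverlap +=1
--         if numOverlap == 1:
--             exactlyOneOverlapCt += 1
--
--     return len(allSimGenesS),len(allXgiGenesS),len(matchS),exactlyOneOverlapCt
-- ===== SOURCE B (Python) =====
-- def countSimXgiGenesOverlaps(simSL, xgiSL):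
--     # Index each gene to the xgi islands containing it; one pass per gene occurrence.
--     gene2xgi = {}
--     allXgiGenesS = set()
--     for i, S in enumerate(xgiSL):
--         for g in S:
--             gene2xgi.setdefault(g, []).append(i)
--             allXgiGenesS.add(g)
--
--     allSimGenesS = set()
--     for S in simSL:
--         allSimGenesS.update(S)
--
--     matchCt = sum(1 for g in allSimGenesS if g in gene2xgi)
--
--     exactlyOneOverlapCt = 0
--     for simS in simSL:
--         ids = set()
--         for g in simS:
--             ids.update(gene2xgi.get(g, []))
--         if len(ids) == 1:
--             exactlyOneOverlapCt += 1
--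
--     return len(allSimGenesS), len(allXgiGenesS), matchCt, exactlyOneOverlapCt
-- ===== Notes on version B (the rewrite author's own statement) =====
-- stated objective: faster
-- what changed: Replaces the nested sim-island x xgi-island intersection scan by a one-pass gene->xgi-island-index map: per sim island the distinct overlapping island ids are gathered from its genes, and the overlap count of the gene sets comes from membership in that map.
import Mathlib
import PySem

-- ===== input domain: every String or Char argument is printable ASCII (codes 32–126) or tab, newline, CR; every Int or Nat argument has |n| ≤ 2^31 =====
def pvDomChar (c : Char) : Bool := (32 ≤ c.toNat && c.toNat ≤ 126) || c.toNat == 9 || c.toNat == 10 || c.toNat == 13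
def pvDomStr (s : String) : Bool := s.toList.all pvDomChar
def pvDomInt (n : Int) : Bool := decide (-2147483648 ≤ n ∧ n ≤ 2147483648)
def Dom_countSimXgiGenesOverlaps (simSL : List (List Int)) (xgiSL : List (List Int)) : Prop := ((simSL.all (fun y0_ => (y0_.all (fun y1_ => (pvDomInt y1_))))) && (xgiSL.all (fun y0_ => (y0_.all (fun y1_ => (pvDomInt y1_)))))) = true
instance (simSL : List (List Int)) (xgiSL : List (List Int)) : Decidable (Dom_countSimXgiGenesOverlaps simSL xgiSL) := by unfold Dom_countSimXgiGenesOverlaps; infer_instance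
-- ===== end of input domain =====

-- B replaces A's nested sim-island × xgi-island intersection scan by a one-pass
-- gene → xgi-island-index map (objective: faster, asymptotically).

-- ===== PORT A =====
def countSimXgiGenesOverlaps (simSL : List (List Int)) (xgiSL : List (List Int)) : Int × Int × Int × Int :=
  let allSimGenesS := simSL.foldl (fun s S => PySem.Set.update s S) PySem.Set.empty
  let allXgiGenesS := xgiSL.foldl (fun s S => PySem.Set.update s S) PySem.Set.empty
  let matchS := PySem.Set.inter allSimGenesS allXgiGenesS
  let exactlyOneOverlapCt := simSL.foldl (fun ct simS =>
      let numOverlap := xgiSL.foldl (fun n xgiS =>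
          if 0 < PySem.Set.len (PySem.Set.inter simS xgiS) then n + 1 else n) (0 : Int)
      if numOverlap == 1 then ct + 1 else ct) (0 : Int)
  (PySem.Set.len allSimGenesS, PySem.Set.len allXgiGenesS, PySem.Set.len matchS, exactlyOneOverlapCt)

-- ===== PORT B =====
def countSimXgiGenesOverlaps_alt (simSL : List (List Int)) (xgiSL : List (List Int)) : Int × Int × Int × Int :=
  -- for i, S in enumerate(xgiSL): for g in S: gene2xgi.setdefault(g, []).append(i); allXgiGenesS.add(g)
  let p := (PySem.List.enumerate xgiSL 0).foldl
      (fun q iS => iS.2.foldl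
          (fun q g => (PySem.Dict.modify q.1 g [] (fun l => l ++ [iS.1]), PySem.Set.add q.2 g)) q)
      ((PySem.Dict.empty : PySem.Dict Int (List Int)), (PySem.Set.empty : PySem.Set Int))
  let gene2xgi := p.1
  let allXgiGenesS := p.2
  let allSimGenesS := simSL.foldl (fun s S => PySem.Set.update s S) PySem.Set.empty
  let matchCt := allSimGenesS.foldl (fun n g => if gene2xgi.contains g then n + 1 else n) (0 : Int)
  let exactlyOneOverlapCt := simSL.foldl (fun ct simS =>
      let ids := simS.foldl (fun s g => PySem.Set.update s (gene2xgi.getD g [])) PySem.Set.empty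
      if PySem.Set.len ids == 1 then ct + 1 else ct) (0 : Int)
  (PySem.Set.len allSimGenesS, PySem.Set.len allXgiGenesS, matchCt, exactlyOneOverlapCt)

-- ===== PRECONDITION & SPEC =====
def Spec_countSimXgiGenesOverlaps (simSL : List (List Int)) (xgiSL : List (List Int)) (out : Int × Int × Int × Int) : Prop := out = countSimXgiGenesOverlaps_alt simSL xgiSL
instance (simSL : List (List Int)) (xgiSL : List (List Int)) (out : Int × Int × Int × Int) : Decidable (Spec_countSimXgiGenesOverlaps simSL xgiSL out) := by unfold Spec_countSimXgiGenesOverlaps; infer_instance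

-- ===== CLAIM (what is proved, stated in full; the proofs are below) =====
def Claim_equal_countSimXgiGenesOverlaps : Prop := ∀ (simSL : List (List Int)) (xgiSL : List (List Int)), Dom_countSimXgiGenesOverlaps simSL xgiSL → Spec_countSimXgiGenesOverlaps simSL xgiSL (countSimXgiGenesOverlaps simSL xgiSL)

-- ===== LEMMAS AND PROOFS =====

-- membership in the union-of-all-islands set
theorem pv_mem_bigU (L : List (List Int)) (s : PySem.Set Int) (g : Int) :
    g ∈ L.foldl (fun s S => PySem.Set.update s S) s ↔ g ∈ s ∨ ∃ S ∈ L, g ∈ S := by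
  induction L generalizing s with
  | nil => simp
  | cons S t ih => simp [ih, PySem.Set.mem_update]; tauto

-- B's pair-accumulator loop is a dict loop and a set loop
theorem pv_build_split (L : List (Int × List Int)) (d : PySem.Dict Int (List Int)) (s : PySem.Set Int) :
    L.foldl (fun q iS => iS.2.foldl
        (fun q g => (PySem.Dict.modify q.1 g [] (fun l => l ++ [iS.1]), PySem.Set.add q.2 g)) q) (d, s)
      = (L.foldl (fun d iS => iS.2.foldl (fun d g => PySem.Dict.modify d g [] (fun l => l ++ [iS.1])) d) d,
         L.foldl (fun s iS => PySem.Set.update s iS.2) s) := by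
  induction L generalizing d s with
  | nil => rfl
  | cons iS t ih =>
      simp only [List.foldl_cons]
      rw [PySem.List.foldl_prod_mk (f := fun d g => PySem.Dict.modify d g [] (fun l => l ++ [iS.1]))
            (g := fun s g => PySem.Set.add s g), ih]
      rfl

-- the set accumulated alongside the dict is the plain union over the islands
theorem pv_snd_fold (xgiSL : List (List Int)) (s : PySem.Set Int) :
    (PySem.List.enumerate xgiSL 0).foldl (fun s iS => PySem.Set.update s iS.2) s
      = xgiSL.foldl (fun s S => PySem.Set.update s S) s := by
  conv_rhs => rw [← PySem.List.map_snd_enumerate xgiSL 0]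
  rw [List.foldl_map]

-- index list stored under a gene: membership characterisation
theorem pv_memD (L : List (Int × List Int)) (d : PySem.Dict Int (List Int)) (g i : Int) :
    i ∈ (L.foldl (fun d iS => iS.2.foldl (fun d g => PySem.Dict.modify d g [] (fun l => l ++ [iS.1])) d) d).getD g []
      ↔ i ∈ d.getD g [] ∨ ∃ p ∈ L, g ∈ p.2 ∧ i = p.1 := by
  induction L generalizing d with
  | nil => simp
  | cons iS t ih =>
      simp only [List.foldl_cons, ih]
      have h : (iS.2.foldl (fun d g => PySem.Dict.modify d g [] (fun l => l ++ [iS.1])) d)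
          = (iS.2.map (fun g => (g, iS.1))).foldl (fun d p => PySem.Dict.modify d p.1 [] (fun l => l ++ [p.2])) d := by
        rw [List.foldl_map]
      rw [h, PySem.Dict.getD_foldl_modify_append]
      simp only [List.mem_append, List.mem_map, List.mem_filter, List.mem_cons, beq_iff_eq]
      constructor
      · rintro ((h1 | h1) | h1)
        · exact Or.inl h1
        · rcases h1 with ⟨x, ⟨⟨g', hg', rfl⟩, hx⟩, hi⟩
          exact Or.inr ⟨iS, Or.inl rfl, by simp_all, by simp_all⟩
        · rcases h1 with ⟨p, hp, h2, h3⟩; exact Or.inr ⟨p, Or.inr hp, h2, h3⟩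
      · rintro (h1 | ⟨p, (hp | hp), h2, h3⟩)
        · exact Or.inl (Or.inl h1)
        · subst hp; exact Or.inl (Or.inr ⟨(g, p.1), ⟨⟨g, h2, rfl⟩, rfl⟩, h3.symm⟩)
        · exact Or.inr ⟨p, hp, h2, h3⟩

-- keys of the gene index = genes occurring in some xgi island
theorem pv_containsD (L : List (Int × List Int)) (d : PySem.Dict Int (List Int)) (g : Int) :
    (L.foldl (fun d iS => iS.2.foldl (fun d g => PySem.Dict.modify d g [] (fun l => l ++ [iS.1])) d) d).contains g = true
      ↔ d.contains g = true ∨ ∃ p ∈ L, g ∈ p.2 := by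
  induction L generalizing d with
  | nil => simp
  | cons iS t ih =>
      simp only [List.foldl_cons, ih]
      have h : (iS.2.foldl (fun d g => PySem.Dict.modify d g [] (fun l => l ++ [iS.1])) d).contains g = true
          ↔ d.contains g = true ∨ g ∈ iS.2 := by
        rw [PySem.Dict.contains_eq_decide_mem_keys,
            PySem.Dict.keys_foldl_modify iS.2 [] (fun _ _ l => l ++ [iS.1]) d,
            PySem.Dict.contains_iff_mem_keys]
        simp [PySem.Set.mem_update]
      rw [h]
      constructor
      · rintro ((h1 | h1) | h1)
        · exact Or.inl h1
        · exact Or.inr ⟨iS, List.mem_cons_self, h1⟩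
        · rcases h1 with ⟨p, hp, h2⟩; exact Or.inr ⟨p, List.mem_cons_of_mem _ hp, h2⟩
      · rintro (h1 | ⟨p, hp, h2⟩)
        · exact Or.inl (Or.inl h1)
        · rcases List.mem_cons.mp hp with rfl | hp'
          · exact Or.inl (Or.inr h2)
          · exact Or.inr ⟨p, hp', h2⟩

-- ids loop: membership and nodup
theorem pv_mem_ids (simS : List Int) (D : PySem.Dict Int (List Int)) (s : PySem.Set Int) (i : Int) :
    i ∈ simS.foldl (fun s g => PySem.Set.update s (D.getD g [])) s
      ↔ i ∈ s ∨ ∃ g ∈ simS, i ∈ D.getD g [] := by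
  induction simS generalizing s with
  | nil => simp
  | cons g t ih => simp [ih, PySem.Set.mem_update]; tauto

theorem pv_nodup_ids (simS : List Int) (D : PySem.Dict Int (List Int)) (s : PySem.Set Int) (hs : s.Nodup) :
    (simS.foldl (fun s g => PySem.Set.update s (D.getD g [])) s).Nodup := by
  induction simS generalizing s with
  | nil => exact hs
  | cons g t ih => exact ih _ (PySem.Set.nodup_update s _ hs)

-- overlap test of A is the existence of a shared gene
theorem pv_overlap_iff (simS S : List Int) :
    0 < PySem.Set.len (PySem.Set.inter simS S) ↔ ∃ g ∈ simS, g ∈ S := by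
  simp only [PySem.Set.len, PySem.Set.inter]
  rw [Int.natCast_pos, List.length_pos_iff_exists_mem]
  simp [List.mem_filter]

-- core: per sim island, |distinct overlapping island ids| = number of overlapping islands
theorem pv_ids_len (simS : List Int) (xgiSL : List (List Int)) :
    PySem.Set.len (simS.foldl (fun s g => PySem.Set.update s
        (((PySem.List.enumerate xgiSL 0).foldl (fun d iS => iS.2.foldl
            (fun d g => PySem.Dict.modify d g [] (fun l => l ++ [iS.1])) d) PySem.Dict.empty).getD g []))
        PySem.Set.empty)
      = (xgiSL.countP (fun S => decide (∃ g ∈ simS, g ∈ S)) : Int) := by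
  set D := (PySem.List.enumerate xgiSL 0).foldl (fun d iS => iS.2.foldl
      (fun d g => PySem.Dict.modify d g [] (fun l => l ++ [iS.1])) d) PySem.Dict.empty with hD
  set ids := simS.foldl (fun s g => PySem.Set.update s (D.getD g [])) PySem.Set.empty with hids
  set W := ((PySem.List.enumerate xgiSL 0).filter (fun iS => decide (∃ g ∈ simS, g ∈ iS.2))).map (fun p => p.1) with hW
  have hmem : ∀ i, i ∈ ids ↔ i ∈ W := by
    intro i
    rw [hids, pv_mem_ids]
    simp only [PySem.Set.empty, List.not_mem_nil, false_or]
    constructor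
    · rintro ⟨g, hg, hi⟩
      rw [hD, pv_memD] at hi
      simp only [PySem.Dict.getD_empty, List.not_mem_nil, false_or] at hi
      rcases hi with ⟨p, hp, h1, h2⟩
      rw [hW]
      simp only [List.mem_map, List.mem_filter]
      exact ⟨p, ⟨hp, by exact decide_eq_true ⟨g, hg, h1⟩⟩, h2.symm⟩
    · intro hi
      rw [hW] at hi
      simp only [List.mem_map, List.mem_filter, decide_eq_true_eq] at hi
      rcases hi with ⟨p, ⟨hp, g, hg, hgp⟩, rfl⟩
      refine ⟨g, hg, ?_⟩
      rw [hD, pv_memD]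
      simp only [PySem.Dict.getD_empty, List.not_mem_nil, false_or]
      exact ⟨p, hp, hgp, rfl⟩
  have hnd1 : ids.Nodup := pv_nodup_ids _ _ _ List.nodup_nil
  have hnd2 : W.Nodup := by
    rw [hW]
    have h1 := (PySem.List.pairwise_lt_enumerate xgiSL 0).filter (fun iS => decide (∃ g ∈ simS, g ∈ iS.2))
    have h2 : (((PySem.List.enumerate xgiSL 0).filter (fun iS => decide (∃ g ∈ simS, g ∈ iS.2))).map
        (fun p => p.1)).Pairwise (· < ·) := List.pairwise_map.mpr h1
    exact h2.imp (fun h => ne_of_lt h)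
  have hperm : ids.Perm W := (List.perm_ext_iff_of_nodup hnd1 hnd2).mpr hmem
  have hlen : ids.length = W.length := hperm.length_eq
  rw [PySem.Set.len, hlen, hW, List.length_map, ← List.countP_eq_length_filter]
  congr 1
  conv_rhs => rw [← PySem.List.map_snd_enumerate xgiSL 0, List.countP_map]
  rfl

theorem pv_mem_enum_iff (xgiSL : List (List Int)) (g : Int) :
    (∃ p ∈ PySem.List.enumerate xgiSL 0, g ∈ p.2) ↔ ∃ S ∈ xgiSL, g ∈ S := by
  constructor
  · rintro ⟨p, hp, h⟩
    rcases (PySem.List.mem_enumerate_iff xgiSL 0 p).mp hp with ⟨k, hk, rfl⟩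
    exact ⟨xgiSL[k], List.getElem_mem hk, h⟩
  · rintro ⟨S, hS, h⟩
    rcases List.mem_iff_getElem.mp hS with ⟨k, hk, rfl⟩
    exact ⟨((0 : Int) + k, xgiSL[k]), (PySem.List.mem_enumerate_iff xgiSL 0 _).mpr ⟨k, hk, rfl⟩, h⟩

-- ===== VERDICT (by name: the statement is the Claim_ definition above) =====
theorem countSimXgiGenesOverlaps_spec : Claim_equal_countSimXgiGenesOverlaps := by
  intro simSL xgiSL _
  show countSimXgiGenesOverlaps simSL xgiSL = countSimXgiGenesOverlaps_alt simSL xgiSL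
  unfold countSimXgiGenesOverlaps countSimXgiGenesOverlaps_alt
  rw [pv_build_split]
  set D := (PySem.List.enumerate xgiSL 0).foldl (fun d iS => iS.2.foldl
      (fun d g => PySem.Dict.modify d g [] (fun l => l ++ [iS.1])) d) PySem.Dict.empty with hD
  set allSim := simSL.foldl (fun s S => PySem.Set.update s S) PySem.Set.empty with hSim
  set allXgi := xgiSL.foldl (fun s S => PySem.Set.update s S) PySem.Set.empty with hXgi
  rw [pv_snd_fold]
  refine Prod.ext rfl (Prod.ext rfl (Prod.ext ?_ ?_))
  · -- third component: |allSim ∩ allXgi| = count of allSim genes present in the index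
    show PySem.Set.len (PySem.Set.inter allSim allXgi)
        = allSim.foldl (fun n g => if D.contains g then n + 1 else n) (0 : Int)
    rw [PySem.List.foldl_if_add_one (fun g => D.contains g) allSim 0, zero_add]
    simp only [PySem.Set.len, PySem.Set.inter, ← List.countP_eq_length_filter]
    congr 1
    apply List.countP_congr
    intro g _
    rw [PySem.Set.contains_iff, hXgi, pv_mem_bigU, hD, pv_containsD]
    simp only [PySem.Dict.contains_empty, Bool.false_eq_true, false_or,
      PySem.Set.empty, List.not_mem_nil]
    exact (pv_mem_enum_iff xgiSL g).symm
  · -- fourth component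
    show simSL.foldl (fun ct simS =>
          if (xgiSL.foldl (fun n xgiS => if 0 < PySem.Set.len (PySem.Set.inter simS xgiS) then n + 1 else n) (0 : Int)) == 1
          then ct + 1 else ct) (0 : Int)
        = simSL.foldl (fun ct simS =>
          if PySem.Set.len (simS.foldl (fun s g => PySem.Set.update s (D.getD g [])) PySem.Set.empty) == 1
          then ct + 1 else ct) (0 : Int)
    apply PySem.List.foldl_congr_mem
    intro ct simS _
    have h1 : (xgiSL.foldl (fun n xgiS => if 0 < PySem.Set.len (PySem.Set.inter simS xgiS) then n + 1 else n) (0 : Int))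
        = (xgiSL.countP (fun S => decide (∃ g ∈ simS, g ∈ S)) : Int) := by
      rw [PySem.List.foldl_ite_add_one (fun xgiS => 0 < PySem.Set.len (PySem.Set.inter simS xgiS)) xgiSL 0, zero_add]
      congr 1
      apply List.countP_congr
      intro S _
      simp only [decide_eq_true_eq]
      exact pv_overlap_iff simS S
    rw [h1, hD, pv_ids_len simS xgiSL]
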